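-- pv_equiv track=rewrite | github.com/pepe-olivert/GA_competition | GA.py | inverted_transformation
-- ===== SOURCE A (Python) =====
-- def inverted_transformation(solution):
--     """
--     Function to invert the solution.
--
--     :param solution: A given solution to translate.
--     :type solution: str
--
--     :return: The new solution.
--     :rtype: list
--     """
--
--     final = []
--     for i,elem in enumerate(solution):
--         for n in elem:
--             final.append(n)
--         if i !=len(solution)-1:
--             final.append(0)
--     return final
-- ===== SOURCE B (Python) =====
-- def inverted_transformation(solution):
--     # Two-phase build-then-flatten: construct the list of pieces (sublists at even
--     # slots, [0] separators at odd slots) via slice assignment, then flatten once.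
--     if not solution:
--         return []
--     pieces = [[0]] * (2 * len(solution) - 1)
--     pieces[0::2] = solution
--     return [n for piece in pieces for n in piece]
-- ===== Notes on version B (the rewrite author's own statement) =====
-- stated objective: alternative
-- what changed: Replaces A's single streaming pass with an is-last index test by a two-phase build-then-flatten: first materialise an interleaved pieces list (sublists at even slots, [0] separators at odd slots, placed by slice assignment), then flatten it once with a comprehension.
import Mathlib
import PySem

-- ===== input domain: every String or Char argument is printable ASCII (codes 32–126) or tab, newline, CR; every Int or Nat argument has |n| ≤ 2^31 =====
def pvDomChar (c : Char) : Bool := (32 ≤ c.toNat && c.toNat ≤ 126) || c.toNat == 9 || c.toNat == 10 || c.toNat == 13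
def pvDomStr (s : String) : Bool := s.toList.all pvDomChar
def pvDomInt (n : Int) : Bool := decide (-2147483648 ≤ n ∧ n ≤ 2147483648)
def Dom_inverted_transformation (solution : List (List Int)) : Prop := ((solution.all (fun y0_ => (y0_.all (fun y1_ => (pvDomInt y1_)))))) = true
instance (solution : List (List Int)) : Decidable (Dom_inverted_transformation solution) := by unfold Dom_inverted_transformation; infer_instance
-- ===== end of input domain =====

-- B replaces A's streaming is-last pass by a two-phase build-then-flatten: slice-assign the sublists into an interleaved pieces list of [0] separators, then flatten once (alternative decomposition, same cost).


-- ===== PORT A =====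
-- the for-loop over enumerate(solution), carrying the running index i
def invA_go (total : Int) (i : Nat) (rest : List (List Int)) (final : List Int) : List Int :=
  match rest with
  | [] => final
  | elem :: rest' =>
    -- inner 'for n in elem: final.append(n)', then the conditional separator append
    invA_go total (i + 1) rest'
      (if (i : Int) ≠ total - 1 then (elem.foldl (fun f n => f ++ [n]) final) ++ [0]
       else elem.foldl (fun f n => f ++ [n]) final)

def inverted_transformation (solution : List (List Int)) : List Int :=
  invA_go (solution.length : Int) 0 solution []

-- ===== PORT B =====
-- pieces[0::2] = solution : overwrite positions 0,2,4,… of pieces with the sublists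
def invB_assign (pieces : List (List Int)) (sols : List (List Int)) : List (List Int) :=
  match pieces, sols with
  | pieces, [] => pieces
  | [], _ => []
  | [_], s :: _ => [s]
  | _ :: q :: r, s :: ss => s :: q :: invB_assign r ss

def inverted_transformation_alt (solution : List (List Int)) : List Int :=
  if solution = [] then []
  else
    -- pieces = [[0]] * (2*len(solution)-1); pieces[0::2] = solution
    let pieces := invB_assign (List.replicate (2 * solution.length - 1) [0]) solution
    -- [n for piece in pieces for n in piece]
    pieces.flatten

-- ===== PRECONDITION & SPEC =====
def Spec_inverted_transformation (solution : List (List Int)) (out : List Int) : Prop := out = inverted_transformation_alt solution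
instance (solution : List (List Int)) (out : List Int) : Decidable (Spec_inverted_transformation solution out) := by unfold Spec_inverted_transformation; infer_instance

-- ===== CLAIM (what is proved, stated in full; the proofs are below) =====
def Claim_equal_inverted_transformation : Prop := ∀ (solution : List (List Int)), Dom_inverted_transformation solution → Spec_inverted_transformation solution (inverted_transformation solution)

-- ===== LEMMAS AND PROOFS =====

-- reference shape: sublists interleaved with single 0 separators
def sepFlat : List (List Int) → List Int
  | [] => []
  | [x] => x
  | x :: y :: rest => x ++ 0 :: sepFlat (y :: rest)

theorem foldl_append_singleton (elem : List Int) (final : List Int) :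
    elem.foldl (fun f n => f ++ [n]) final = final ++ elem := by
  induction elem generalizing final with
  | nil => simp
  | cons n rest ih => rw [List.foldl_cons, ih]; simp

theorem invA_go_eq (total : Int) (l : List (List Int)) (i : Nat) (final : List Int)
    (h : (i : Int) + l.length = total) :
    invA_go total i l final = final ++ sepFlat l := by
  induction l generalizing i final with
  | nil => simp [invA_go, sepFlat]
  | cons x rest ih =>
    cases rest with
    | nil =>
      have hi : ¬ ((i : Int) ≠ total - 1) := by simp at h ⊢; omega
      unfold invA_go
      rw [foldl_append_singleton, if_neg hi]
      simp [invA_go, sepFlat]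
    | cons y rest' =>
      have hi : (i : Int) ≠ total - 1 := by simp at h; omega
      have h' : ((i + 1 : Nat) : Int) + (y :: rest').length = total := by
        simp at h ⊢; omega
      unfold invA_go
      rw [foldl_append_singleton, if_pos hi, ih _ _ h']
      simp [sepFlat]

theorem invB_assign_flatten (l : List (List Int)) (h : l ≠ []) :
    (invB_assign (List.replicate (2 * l.length - 1) [0]) l).flatten = sepFlat l := by
  induction l with
  | nil => simp at h
  | cons x rest ih =>
    cases rest with
    | nil => simp [invB_assign, sepFlat]
    | cons y rest' =>
      have hlen : 2 * (x :: y :: rest').length - 1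
          = ((2 * (y :: rest').length - 1) + 1) + 1 := by simp; omega
      rw [hlen, List.replicate_succ, List.replicate_succ, invB_assign,
        List.flatten_cons, List.flatten_cons, ih (by simp)]
      simp [sepFlat]

-- ===== VERDICT (by name: the statement is the Claim_ definition above) =====
theorem inverted_transformation_spec : Claim_equal_inverted_transformation := by
  intro solution _
  show inverted_transformation solution = inverted_transformation_alt solution
  unfold inverted_transformation inverted_transformation_alt
  cases solution with
  | nil => simp [invA_go]
  | cons x rest =>
    rw [invA_go_eq _ _ 0 [] (by simp), if_neg (by simp),
      invB_assign_flatten _ (by simp)]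
    simp
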